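-- pv_equiv track=rewrite | github.com/Aartichoke/SQL_benchmark_long_VARCHAR | test.py | convert
-- ===== SOURCE A (Python) =====
-- def convert(unique):
--     result = []
--     tmp = []
--     # use algo to create char array
--     while (unique > 0):
--         rem = unique % 26
--         tmp.append(chr(ord('A') + int(rem)))
--         unique = unique // 26;
--     tmp.reverse()
--
--     # append with A's to make 7 digits
--     for i in (range(7-len(tmp))):
--         result.append('A')
--
--     # append with char array
--     for i in tmp:
--         result.append(i)
--
--     # concat result string with 45 X characters
--     return ("".join(result)+"X"*45)
-- ===== SOURCE B (Python) =====
-- def convert(unique):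
--     # MSB-first: compute each digit directly by place value; padding to 7 comes for free.
--     if unique < 0:
--         unique = 0  # no base-26 digits for non-positive ids -> all-'A' pad
--     L = 7
--     while 26 ** L <= unique:
--         L += 1
--     digits = "".join(chr(ord('A') + (unique // 26 ** i) % 26) for i in reversed(range(L)))
--     return digits + "X" * 45
-- ===== Notes on version B (the rewrite author's own statement) =====
-- stated objective: alternative
-- what changed: B computes the base-26 digits most-significant-first by place value ((unique // 26**i) % 26 over a precomputed output length), instead of A's low-to-high remainder loop followed by reverse and a separate padding loop.
import Mathlib
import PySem

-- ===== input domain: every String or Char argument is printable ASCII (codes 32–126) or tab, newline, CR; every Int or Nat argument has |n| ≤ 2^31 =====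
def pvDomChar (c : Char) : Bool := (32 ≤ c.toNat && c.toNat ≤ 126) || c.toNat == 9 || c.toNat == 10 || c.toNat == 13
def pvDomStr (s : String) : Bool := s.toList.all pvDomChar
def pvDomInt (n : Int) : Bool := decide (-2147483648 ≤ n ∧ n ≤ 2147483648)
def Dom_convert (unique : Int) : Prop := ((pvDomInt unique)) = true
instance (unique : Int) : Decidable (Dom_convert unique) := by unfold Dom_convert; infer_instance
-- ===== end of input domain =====

-- B computes the base-26 digits most-significant-first by place value instead of A's
-- low-to-high remainder loop + reverse + separate padding loop ("alternative" objective).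

-- ===== PORT A =====
-- the `while (unique > 0)` loop building tmp (least-significant digit first)
def convertTmp (n : Int) : List Char :=
  if h : n > 0 then
    Char.ofNat (65 + (PySem.Int.mod n 26).toNat) :: convertTmp (PySem.Int.floordiv n 26)
  else []
termination_by n.toNat
decreasing_by
  rw [PySem.Int.floordiv_eq_ediv_of_pos (by norm_num : (0:Int) < 26)]
  omega

def convert (unique : Int) : String :=
  let tmp := (convertTmp unique).reverse
  let result := List.replicate (7 - tmp.length) 'A' ++ tmp
  String.ofList result ++ "XXXXXXXXXXXXXXXXXXXXXXXXXXXXXXXXXXXXXXXXXXXXX"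

-- ===== PORT B =====
-- the `while 26 ** L <= unique` loop computing the output length
def lenLoop (u : Int) (L : Nat) : Nat :=
  if h : (26:Int) ^ L ≤ u then lenLoop u (L + 1) else L
termination_by u.toNat + 1 - 26 ^ L
decreasing_by
  have hc : ((26:Nat) ^ L : Int) ≤ u := by push_cast; exact h
  have h1 : (26:Nat) ^ L ≤ u.toNat := by omega
  have h2 : (26:Nat) ^ L < 26 ^ (L + 1) :=
    Nat.pow_lt_pow_right (by norm_num) (Nat.lt_succ_self L)
  omega

def convert_alt (unique : Int) : String :=
  let u : Int := if unique < 0 then 0 else unique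
  let L := lenLoop u 7
  String.ofList ((List.range L).reverse.map
    (fun i => Char.ofNat (65 + (PySem.Int.mod (PySem.Int.floordiv u ((26:Int) ^ i)) 26).toNat)))
  ++ "XXXXXXXXXXXXXXXXXXXXXXXXXXXXXXXXXXXXXXXXXXXXX"

-- ===== PRECONDITION & SPEC =====
def Spec_convert (unique : Int) (out : String) : Prop := out = convert_alt unique
instance (unique : Int) (out : String) : Decidable (Spec_convert unique out) := by unfold Spec_convert; infer_instance

-- ===== CLAIM (what is proved, stated in full; the proofs are below) =====
def Claim_equal_convert : Prop := ∀ (unique : Int), Dom_convert unique → Spec_convert unique (convert unique)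

-- ===== LEMMAS AND PROOFS =====

def msbFun (n : Int) (i : Nat) : Char := Char.ofNat (65 + ((n / 26 ^ i) % 26).toNat)

def msb (n : Int) (k : Nat) : List Char := (List.range k).reverse.map (msbFun n)

lemma altFun_eq (n : Int) (i : Nat) :
    Char.ofNat (65 + (PySem.Int.mod (PySem.Int.floordiv n ((26:Int) ^ i)) 26).toNat) = msbFun n i := by
  rw [PySem.Int.floordiv_eq_ediv_of_pos (pow_pos (by norm_num) i),
      PySem.Int.mod_eq_emod_of_pos (by norm_num)]
  rfl

lemma convertTmp_nonpos {n : Int} (h : n ≤ 0) : convertTmp n = [] := by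
  rw [convertTmp]; simp [show ¬ n > 0 by omega]

lemma convertTmp_pos {n : Int} (h : 0 < n) :
    convertTmp n = Char.ofNat (65 + (n % 26).toNat) :: convertTmp (n / 26) := by
  rw [convertTmp, dif_pos h, PySem.Int.floordiv_eq_ediv_of_pos (by norm_num : (0:Int) < 26),
      PySem.Int.mod_eq_emod_of_pos (by norm_num : (0:Int) < 26)]

lemma lenLoop_stop {u : Int} {L : Nat} (h : ¬ (26:Int) ^ L ≤ u) : lenLoop u L = L := by
  rw [lenLoop]; simp [h]

lemma msb_succ (n : Int) (k : Nat) :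
    msb n (k + 1) = msb (n / 26) k ++ [Char.ofNat (65 + (n % 26).toNat)] := by
  have hf : msbFun n ∘ Nat.succ = msbFun (n / 26) := by
    funext i
    simp only [Function.comp, msbFun]
    congr 3
    rw [pow_succ', ← Int.ediv_ediv_of_nonneg (x := n) (by norm_num : (0:Int) ≤ 26)]
  unfold msb
  rw [List.range_succ_eq_map]
  simp only [List.reverse_cons, List.map_append, List.map_map, List.map_reverse, hf]
  simp [msbFun]

lemma key (k : Nat) : ∀ (n : Int), 0 ≤ n → n < 26 ^ k →
    List.replicate (k - (convertTmp n).length) 'A' ++ (convertTmp n).reverse = msb n k := by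
  induction k with
  | zero =>
    intro n h0 h1
    have : n = 0 := by omega
    subst this
    simp [convertTmp_nonpos (le_refl 0), msb]
  | succ k ih =>
    intro n h0 h1
    by_cases hn : n ≤ 0
    · have hz : n = 0 := by omega
      subst hz
      have h2 := ih 0 (le_refl 0) (pow_pos (by norm_num) k)
      rw [convertTmp_nonpos (le_refl 0)] at h2 ⊢
      simp only [List.length_nil, Nat.sub_zero, List.reverse_nil, List.append_nil] at h2 ⊢
      rw [msb_succ]
      simp only [Int.zero_ediv, Int.zero_emod]
      rw [← h2]
      simp [← List.replicate_succ' (n := k)]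
    · have hp : 0 < n := by omega
      rw [convertTmp_pos hp, msb_succ]
      have hd0 : 0 ≤ n / 26 := Int.ediv_nonneg h0 (by norm_num)
      have hd1 : n / 26 < 26 ^ k := by
        have hB : (26:Int) ^ (k + 1) = 26 * 26 ^ k := by ring
        omega
      have h2 := ih (n / 26) hd0 hd1
      simp only [List.length_cons, List.reverse_cons, Nat.succ_sub_succ]
      rw [← List.append_assoc, h2]

-- ===== VERDICT (by name: the statement is the Claim_ definition above) =====
theorem convert_spec : Claim_equal_convert := by
  intro unique hdom
  unfold Spec_convert
  have hdom' : -2147483648 ≤ unique ∧ unique ≤ 2147483648 := by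
    have := hdom
    unfold Dom_convert pvDomInt at this
    exact of_decide_eq_true this
  by_cases h : unique ≤ 0
  · -- both sides are seven 'A's plus the X suffix
    have hu : (if unique < 0 then (0:Int) else unique) = 0 := by split <;> omega
    simp only [convert, convert_alt, hu, convertTmp_nonpos h]
    rw [lenLoop_stop (by norm_num : ¬ (26:Int) ^ 7 ≤ 0)]
    simp only [List.reverse_nil, List.length_nil, Nat.sub_zero, List.append_nil]
    decide
  · have hp : 0 < unique := by omega
    have hu : (if unique < 0 then (0:Int) else unique) = unique := by split <;> omega
    simp only [convert, convert_alt, hu]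
    rw [lenLoop_stop (by
      intro hc
      norm_num at hc
      omega)]
    congr 1
    rw [List.map_congr_left (fun i _ => altFun_eq unique i), List.length_reverse]
    exact congrArg String.ofList (key 7 unique (le_of_lt hp) (by
      have : (26:Int) ^ 7 = 8031810176 := by norm_num
      omega))
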